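-- pv_equiv track=rewrite | github.com/DoxPL/SSD1306_Kernel_Driver | fontgen.py | line_to_num_array
-- ===== SOURCE A (Python) =====
-- CHAR_WIDTH = 5
--
-- def line_to_num_array(line, num):
--     num_array = []
--     length = len(line)
--     index = 0
--     for _ in range(CHAR_WIDTH):
--         if index >= length or line[index] != '*':
--             num_array.append(0)
--         else:
--             num_array.append(num)
--         index += 1
--     return num_array
-- ===== SOURCE B (Python) =====
-- CHAR_WIDTH = 5
--
-- def line_to_num_array(line, num):
--     num_array = [0] * CHAR_WIDTH
--     pos = line.find('*', 0, CHAR_WIDTH)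
--     while pos != -1:
--         num_array[pos] = num
--         pos = line.find('*', pos + 1, CHAR_WIDTH)
--     return num_array
-- ===== Notes on version B (the rewrite author's own statement) =====
-- stated objective: alternative
-- what changed: Instead of A's per-index loop appending 0-or-num for each of the 5 positions, B preallocates a zero array and scatter-writes num only at the '*' positions located by repeated str.find within the first CHAR_WIDTH characters.
import Mathlib
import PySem

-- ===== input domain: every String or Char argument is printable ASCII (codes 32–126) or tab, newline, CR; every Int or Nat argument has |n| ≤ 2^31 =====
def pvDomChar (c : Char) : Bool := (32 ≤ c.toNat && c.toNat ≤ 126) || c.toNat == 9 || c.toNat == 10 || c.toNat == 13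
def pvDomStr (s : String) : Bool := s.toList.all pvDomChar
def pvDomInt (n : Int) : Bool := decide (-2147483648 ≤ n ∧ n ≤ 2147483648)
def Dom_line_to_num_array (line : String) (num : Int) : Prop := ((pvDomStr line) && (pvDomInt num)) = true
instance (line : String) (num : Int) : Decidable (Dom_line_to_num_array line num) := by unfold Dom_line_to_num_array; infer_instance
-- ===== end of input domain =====

-- B replaces A's per-index 0-or-num loop by a zero-filled array with scatter writes at the '*'
-- positions located by repeated bounded find; objective: alternative (same cost, different algorithm).

-- ===== PORT A =====
-- Port of A: fold over range(CHAR_WIDTH) carrying (num_array, index), bounds-checked indexing per step.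
def line_to_num_array (line : String) (num : Int) : List Int :=
  let cs := line.toList
  let length : Int := cs.length
  ((PySem.List.pyRange 0 5 1).foldl (fun (st : List Int × Int) _ =>
      let arr := st.1
      let index := st.2
      if index ≥ length ∨ PySem.List.pyGet? cs index ≠ some '*' then
        (arr ++ [0], index + 1)
      else
        (arr ++ [num], index + 1)) ([], 0)).1

-- ===== PORT B =====
-- line.find('*', i, 5): first index j with i ≤ j < min 5 len and cs[j] = '*', else -1 (exact for Nat start).
def pvFindStar (cs : List Char) (i : Nat) : Int :=
  if h : i < 5 ∧ i < cs.length then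
    if cs[i]'h.2 = '*' then (i : Int) else pvFindStar cs (i + 1)
  else -1
termination_by 5 - i

-- range fact about pvFindStar, needed for pvLoopB's termination
theorem pvFindStar_range (cs : List Char) (i : Nat) (h : pvFindStar cs i ≠ -1) :
    i ≤ (pvFindStar cs i).toNat ∧ (pvFindStar cs i).toNat < 5 := by
  fun_induction pvFindStar cs i with
  | case1 i hlt hc => omega
  | case2 i hlt hc ih => have := ih h; omega
  | case3 i hlt => exact absurd rfl h

-- Port of B's while loop: scatter-write num at each '*' position found, advancing past it.
def pvLoopB (cs : List Char) (num : Int) (arr : List Int) (i : Nat) : List Int :=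
  let p := pvFindStar cs i
  if hp : p = -1 then arr
  else pvLoopB cs num (arr.set p.toNat num) (p.toNat + 1)
termination_by 5 - i
decreasing_by have := pvFindStar_range cs i hp; omega

def line_to_num_array_alt (line : String) (num : Int) : List Int :=
  pvLoopB line.toList num (List.replicate 5 0) 0

-- ===== PRECONDITION & SPEC =====
def Spec_line_to_num_array (line : String) (num : Int) (out : List Int) : Prop := out = line_to_num_array_alt line num
instance (line : String) (num : Int) (out : List Int) : Decidable (Spec_line_to_num_array line num out) := by unfold Spec_line_to_num_array; infer_instance

-- ===== CLAIM (what is proved, stated in full; the proofs are below) =====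
def Claim_equal_line_to_num_array : Prop := ∀ (line : String) (num : Int), Dom_line_to_num_array line num → Spec_line_to_num_array line num (line_to_num_array line num)

-- ===== LEMMAS AND PROOFS =====

-- The per-index value A's loop appends at index j.
def pvCell (cs : List Char) (num : Int) (j : Int) : Int :=
  if j ≥ (cs.length : Int) ∨ PySem.List.pyGet? cs j ≠ some '*' then 0 else num

theorem pvMap_range_shift (g : Int → Int) (i : Int) (n : Nat) :
    (List.range (n+1)).map (fun (k : Nat) => g (i + (k : Int)))
      = g i :: (List.range n).map (fun (k : Nat) => g (i + 1 + (k : Int))) := by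
  rw [List.range_succ_eq_map, List.map_cons, List.map_map]
  congr 1
  · norm_num
  · apply List.map_congr_left
    intro k _
    simp only [Function.comp_apply]
    congr 1
    push_cast
    ring

-- Characterisation of A's fold: it appends pvCell at the successive indices i, i+1, ….
theorem pvFoldA (cs : List Char) (num : Int) (l : List Int) (arr : List Int) (i : Int) :
    (l.foldl (fun (st : List Int × Int) _ =>
        let arr := st.1
        let index := st.2
        if index ≥ (cs.length : Int) ∨ PySem.List.pyGet? cs index ≠ some '*' then
          (arr ++ [0], index + 1)
        else
          (arr ++ [num], index + 1)) (arr, i)).1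
      = arr ++ (List.range l.length).map (fun (k : Nat) => pvCell cs num (i + (k : Int))) := by
  induction l generalizing arr i with
  | nil => simp
  | cons x l ih =>
    simp only [List.foldl_cons, List.length_cons, pvMap_range_shift]
    by_cases h : i ≥ (cs.length : Int) ∨ PySem.List.pyGet? cs i ≠ some '*'
    · simp only [if_pos h, ih]
      simp [pvCell, h]
    · simp only [if_neg h, ih]
      simp [pvCell, h]

-- pvCell in terms of the star predicate (nonnegative index)
theorem pvCell_natCast (cs : List Char) (num : Int) (k : Nat) :
    pvCell cs num (k : Int) = if (k < cs.length ∧ cs[k]! = '*') then num else 0 := by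
  unfold pvCell
  by_cases hl : k < cs.length
  · have hget : PySem.List.pyGet? cs (k : Int) = some cs[k] := by
      rw [PySem.List.pyGet?_natCast, List.getElem?_eq_getElem hl]
    have hk : cs[k]! = cs[k] := getElem!_pos cs k hl
    by_cases hc : cs[k] = '*'
    · rw [if_neg (by push Not; exact ⟨by omega, by rw [hget, hc]⟩),
        if_pos ⟨hl, by rw [hk]; exact hc⟩]
    · rw [if_pos (Or.inr (by rw [hget]; simpa using hc)),
        if_neg (fun hcc => hc (by rw [← hk]; exact hcc.2))]
  · rw [if_pos (Or.inl (by omega)), if_neg (fun hcc => hl hcc.1)]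

-- pvFindStar = -1 means no '*' in [i, min 5 len)
theorem pvFindStar_none (cs : List Char) (i : Nat) (h : pvFindStar cs i = -1) :
    ∀ j, i ≤ j → j < 5 → ¬ (j < cs.length ∧ cs[j]! = '*') := by
  fun_induction pvFindStar cs i with
  | case1 i hlt hc => exact absurd h (by omega)
  | case2 i hlt hc ih =>
    intro j hij hj5 hst
    rcases Nat.eq_or_lt_of_le hij with rfl | hij'
    · exact hc (by rw [← getElem!_pos cs i hlt.2]; exact hst.2)
    · exact ih h j hij' hj5 hst
  | case3 i hlt =>
    intro j hij hj5 hst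
    exact absurd hst.1 (by omega)

-- pvFindStar ≠ -1: the found position is the first '*' in range
theorem pvFindStar_some (cs : List Char) (i : Nat) (h : pvFindStar cs i ≠ -1) :
    ∃ p : Nat, pvFindStar cs i = (p : Int) ∧ i ≤ p ∧ p < 5 ∧ (p < cs.length ∧ cs[p]! = '*') ∧
      (∀ j, i ≤ j → j < p → ¬ (j < cs.length ∧ cs[j]! = '*')) := by
  fun_induction pvFindStar cs i with
  | case1 i hlt hc =>
    refine ⟨i, rfl, le_refl i, hlt.1, ⟨hlt.2, by rw [getElem!_pos cs i hlt.2]; exact hc⟩, ?_⟩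
    intro j h1 h2
    omega
  | case2 i hlt hc ih =>
    obtain ⟨p, hEq, hip, hp5, hstar, hmin⟩ := ih h
    refine ⟨p, hEq, by omega, hp5, hstar, ?_⟩
    intro j h1 h2 hst
    rcases Nat.eq_or_lt_of_le h1 with rfl | h1'
    · exact hc (by rw [← getElem!_pos cs i hlt.2]; exact hst.2)
    · exact hmin j h1' h2 hst
  | case3 i hlt => exact absurd rfl h

theorem pvLoopB_length (cs : List Char) (num : Int) (arr : List Int) (i : Nat) :
    (pvLoopB cs num arr i).length = arr.length := by
  fun_induction pvLoopB cs num arr i with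
  | case1 arr i p hp => rfl
  | case2 arr i p hp ih => rw [ih, List.length_set]

-- Elementwise characterisation of the scatter loop.
theorem pvLoopB_get (cs : List Char) (num : Int) (arr : List Int) (i : Nat)
    (j : Nat) (hj : j < arr.length) (hj5 : j < 5) :
    (pvLoopB cs num arr i)[j]! =
      if i ≤ j ∧ (j < cs.length ∧ cs[j]! = '*') then num else arr[j]! := by
  fun_induction pvLoopB cs num arr i with
  | case1 arr i p hp =>
    have hnone := pvFindStar_none cs i hp
    rw [if_neg (fun hc => (hnone j hc.1 hj5) hc.2)]
  | case2 arr i p' hp ih =>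
    obtain ⟨p, hEq, hip, hp5, hstar, hmin⟩ := pvFindStar_some cs i hp
    have hpt : p'.toNat = p := by show (pvFindStar cs i).toNat = p; rw [hEq]; simp
    have hsetlen : j < (arr.set p'.toNat num).length := by
      simpa [List.length_set] using hj
    rw [ih hsetlen, hpt]
    by_cases hjp : j = p
    · subst hjp
      rw [if_neg (by omega : ¬ (j + 1 ≤ j ∧ (j < cs.length ∧ cs[j]! = '*'))), if_pos ⟨hip, hstar⟩]
      rw [getElem!_pos _ j (by simpa [List.length_set] using hj), List.getElem_set_self]
    · have hgetset : (arr.set p num)[j]! = arr[j]! := by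
        rw [getElem!_pos _ j (by simpa [List.length_set] using hj), getElem!_pos _ j hj]
        exact List.getElem_set_ne (by omega) _
      by_cases hc : i ≤ j ∧ (j < cs.length ∧ cs[j]! = '*')
      · have hjgt : p + 1 ≤ j := by
          rcases Nat.lt_or_ge j p with hlt | hge
          · exact absurd hc.2 (hmin j hc.1 hlt)
          · omega
        rw [if_pos ⟨hjgt, hc.2⟩, if_pos hc]
      · have : ¬ (p + 1 ≤ j ∧ (j < cs.length ∧ cs[j]! = '*')) := fun hcc => hc ⟨by omega, hcc.2⟩
        rw [if_neg this, if_neg hc, hgetset]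

-- ===== VERDICT (by name: the statement is the Claim_ definition above) =====
theorem line_to_num_array_spec : Claim_equal_line_to_num_array := by
  intro line num _
  unfold Spec_line_to_num_array line_to_num_array line_to_num_array_alt
  have hr : PySem.List.pyRange 0 5 1 = [0, 1, 2, 3, 4] := by decide
  rw [hr, pvFoldA line.toList num [0,1,2,3,4] [] 0]
  have hlen5 : ([0,1,2,3,4] : List Int).length = 5 := by norm_num
  rw [hlen5, List.nil_append]
  apply List.ext_getElem
  · simp [pvLoopB_length]
  · intro k hk1 hk2
    simp only [List.length_map, List.length_range] at hk1
    rw [List.getElem_map, List.getElem_range]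
    have hblen : k < (List.replicate 5 (0:Int)).length := by simp; omega
    have hB := pvLoopB_get line.toList num (List.replicate 5 0) 0 k hblen hk1
    rw [getElem!_pos _ k (by simpa [pvLoopB_length] using hblen)] at hB
    rw [hB, zero_add, pvCell_natCast]
    by_cases hst : (k < line.toList.length ∧ line.toList[k]! = '*')
    · rw [if_pos hst, if_pos ⟨Nat.zero_le k, hst⟩]
    · rw [if_neg hst, if_neg (fun hc => hst hc.2)]
      rw [getElem!_pos _ k hblen, List.getElem_replicate]
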